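-- pv_equiv track=rewrite | github.com/shashidharmk/Mathtype | App.py | mathunit
-- ===== SOURCE A (Python) =====
-- def matt(s):
--     h='''<math xmlns="http://www.w3.org/1998/Math/MathML">'''
--     t="</math>"
--     return (h+s+t)
--
-- def mathunit(k):
--  l=[]
--  previouslet=""
--  for alpha in k:
--   if (alpha=="[")or(alpha=="]"):
--    pass
--   else:
--    l.append(alpha)
--  final=[]
--  dig=[]
--  for let in l:
--   if str.isdigit(let):
--    dig.append(let)
--   else:
--    if str.isdigit(previouslet):
--     final.append("".join(dig))
--     dig.clear()
--    dig.append(let)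
--   previouslet=let
--  final.append("".join(dig))
--  math=[]
--  for d in final:
--   if str.isdigit(d):
--    math.append("<mn>"+d+"</mn>")
--   else:
--    if d=="." or d==",":
--     math.append("<mi>"+d+"</mi>")
--    else:
--     if d=="*":
--      math.append("<mo>"+"&#215;"+"</mo>")
--     elif d=="/":
--      math.append("<mo>"+"&#247;"+"</mo>")
--     elif d==">":
--      math.append("<mo>"+"&#62;"+"</mo>")
--     elif d=="<":
--      math.append("<mo>"+"&#60;"+"</mo>")
--     else:
--      math.append("<mo>&#160;</mo>")
--      math.append("<mi>"+d+"</mi>")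
--      math.append("<mo>&#160;</mo>")
--  return matt("".join(math))
-- ===== SOURCE B (Python) =====
-- def _markup(d):
--     if d.isdigit():
--         return "<mn>" + d + "</mn>"
--     if d == "." or d == ",":
--         return "<mi>" + d + "</mi>"
--     if d == "*":
--         return "<mo>&#215;</mo>"
--     if d == "/":
--         return "<mo>&#247;</mo>"
--     if d == ">":
--         return "<mo>&#62;</mo>"
--     if d == "<":
--         return "<mo>&#60;</mo>"
--     return "<mo>&#160;</mo><mi>" + d + "</mi><mo>&#160;</mo>"
--
-- def mathunit(k):
--     # drop brackets, then find all token boundaries at once (a cut falls exactly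
--     # between a digit and a following non-digit), and slice the tokens out.
--     s = "".join(c for c in k if c != "[" and c != "]")
--     cuts = [i for i, (p, c) in enumerate(zip(s, s[1:]), 1)
--             if p.isdigit() and not c.isdigit()]
--     body = "".join(_markup(s[a:b]) for a, b in zip([0] + cuts, cuts + [len(s)]))
--     return ('<math xmlns="http://www.w3.org/1998/Math/MathML">'
--             + body + '</math>')
-- ===== Notes on version B (the rewrite author's own statement) =====
-- stated objective: alternative
-- what changed: Replaces A's character-by-character state machine (bracket-stripping loop, then a tokenizer that accumulates a 'dig' buffer and flushes on a previous-char-digit test, then a markup pass) by a cut-point formulation: after stripping brackets, all token boundaries are computed at once as the indices where a digit is followed by a non-digit (via enumerate over adjacent pairs), and the tokens are sliced out between consecutive cuts and marked up directly.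
import Mathlib
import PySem

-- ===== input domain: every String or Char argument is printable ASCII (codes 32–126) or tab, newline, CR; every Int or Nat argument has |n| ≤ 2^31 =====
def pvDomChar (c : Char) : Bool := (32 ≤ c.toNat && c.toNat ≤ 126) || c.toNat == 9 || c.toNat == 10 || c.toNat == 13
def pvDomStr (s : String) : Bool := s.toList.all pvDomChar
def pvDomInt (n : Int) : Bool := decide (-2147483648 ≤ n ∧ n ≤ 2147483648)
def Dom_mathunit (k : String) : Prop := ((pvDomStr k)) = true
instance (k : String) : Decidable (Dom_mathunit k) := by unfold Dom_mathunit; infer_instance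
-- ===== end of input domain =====

-- B replaces A's char-by-char tokenizer state machine by a cut-point formulation:
-- compute all digit→non-digit boundary indices at once and slice the tokens out
-- between consecutive cuts (objective: alternative decomposition, same O(n) cost).

-- ===== PORT A =====
def matt (s : String) : String :=
  "<math xmlns=\"http://www.w3.org/1998/Math/MathML\">" ++ s ++ "</math>"

def mathunit (k : String) : String :=
  let l := k.toList.foldl (fun l alpha =>
    if alpha = '[' ∨ alpha = ']' then l else l ++ [alpha]) ([] : List Char)
  let st := l.foldl (fun (st : List String × List Char × String) lett =>
    if PySem.Chars.isdigit lett then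
      (st.1, st.2.1 ++ [lett], String.ofList [lett])
    else if PySem.Str.strIsdigit st.2.2 then
      (st.1 ++ [String.ofList st.2.1], [lett], String.ofList [lett])
    else (st.1, st.2.1 ++ [lett], String.ofList [lett]))
    (([], [], "") : List String × List Char × String)
  let final := st.1 ++ [String.ofList st.2.1]
  let math := final.foldl (fun math d =>
    if PySem.Str.strIsdigit d then math ++ ["<mn>" ++ d ++ "</mn>"]
    else if d = "." ∨ d = "," then math ++ ["<mi>" ++ d ++ "</mi>"]
    else if d = "*" then math ++ ["<mo>" ++ "&#215;" ++ "</mo>"]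
    else if d = "/" then math ++ ["<mo>" ++ "&#247;" ++ "</mo>"]
    else if d = ">" then math ++ ["<mo>" ++ "&#62;" ++ "</mo>"]
    else if d = "<" then math ++ ["<mo>" ++ "&#60;" ++ "</mo>"]
    else math ++ ["<mo>&#160;</mo>", "<mi>" ++ d ++ "</mi>", "<mo>&#160;</mo>"])
    ([] : List String)
  matt (PySem.Str.join "" math)

-- ===== PORT B =====
def pvMarkup (d : String) : String :=
  if PySem.Str.strIsdigit d then "<mn>" ++ d ++ "</mn>"
  else if d = "." ∨ d = "," then "<mi>" ++ d ++ "</mi>"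
  else if d = "*" then "<mo>&#215;</mo>"
  else if d = "/" then "<mo>&#247;</mo>"
  else if d = ">" then "<mo>&#62;</mo>"
  else if d = "<" then "<mo>&#60;</mo>"
  else "<mo>&#160;</mo><mi>" ++ d ++ "</mi><mo>&#160;</mo>"

-- Source B: s[a:b] has 0 ≤ a ≤ b ≤ len(s) for every emitted pair, where the Python
-- slice is exactly (s.drop a).take (b - a).
def mathunit_alt (k : String) : String :=
  let s := k.toList.filter (fun c => !(c = '[' ∨ c = ']' : Bool))
  let cuts := ((s.zip (s.drop 1)).zipIdx 1).filterMap
    (fun pi => if PySem.Chars.isdigit pi.1.1 && !PySem.Chars.isdigit pi.1.2 then some pi.2 else none)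
  let body := PySem.Str.join "" (((0 :: cuts).zip (cuts ++ [s.length])).map
    (fun ab => pvMarkup (String.ofList ((s.drop ab.1).take (ab.2 - ab.1)))))
  "<math xmlns=\"http://www.w3.org/1998/Math/MathML\">" ++ body ++ "</math>"

-- ===== PRECONDITION & SPEC =====
def Spec_mathunit (k : String) (out : String) : Prop := out = mathunit_alt k
instance (k : String) (out : String) : Decidable (Spec_mathunit k out) := by unfold Spec_mathunit; infer_instance

-- ===== CLAIM (what is proved, stated in full; the proofs are below) =====
def Claim_equal_mathunit : Prop := ∀ (k : String), Dom_mathunit k → Spec_mathunit k (mathunit k)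

-- ===== LEMMAS AND PROOFS =====

-- boundary positions of s, offset by i: (i + j) is listed iff s[j-1] is a digit and s[j] is not
def pvCutsFrom (i : Nat) : List Char → List Nat
  | p :: c :: r =>
      if PySem.Chars.isdigit p && !PySem.Chars.isdigit c
      then (i+1) :: pvCutsFrom (i+1) (c :: r)
      else pvCutsFrom (i+1) (c :: r)
  | _ => []

-- tokens of s as slices between consecutive cuts (the B-side view)
def pvTokensOf (s : List Char) : List (List Char) :=
  ((0 :: pvCutsFrom 0 s).zip (pvCutsFrom 0 s ++ [s.length])).map
    (fun ab => (s.drop ab.1).take (ab.2 - ab.1))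

-- no internal boundary
def pvNoB (s : List Char) : Prop :=
  List.IsChain (fun p c => ¬(PySem.Chars.isdigit p = true ∧ PySem.Chars.isdigit c = false)) s

theorem pv_join_cons (a : String) (xs : List String) :
    PySem.Str.join "" (a :: xs) = a ++ PySem.Str.join "" xs := by
  cases xs with
  | nil => simp [PySem.Str.join, PySem.Chars.join, List.intercalate]
  | cons b ys => simp [PySem.Str.join, PySem.Chars.join_cons_cons]

theorem pv_join_nil : PySem.Str.join "" ([] : List String) = "" := by
  simp [PySem.Str.join, PySem.Chars.join, List.intercalate]

theorem pv_join_append (xs ys : List String) :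
    PySem.Str.join "" (xs ++ ys) = PySem.Str.join "" xs ++ PySem.Str.join "" ys := by
  induction xs with
  | nil => simp [pv_join_nil]
  | cons a xs ih => simp [pv_join_cons, ih, String.append_assoc]

-- A's first loop is a filter
theorem pv_filter_loop (l acc : List Char) :
    l.foldl (fun l alpha => if alpha = '[' ∨ alpha = ']' then l else l ++ [alpha]) acc
      = acc ++ l.filter (fun c => !(c = '[' ∨ c = ']' : Bool)) := by
  induction l generalizing acc with
  | nil => simp
  | cons c l ih =>
    by_cases hc : c = '[' ∨ c = ']'
    · rw [List.foldl_cons, if_pos hc, List.filter_cons_of_neg (by simp [hc])]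
      exact ih acc
    · rw [List.foldl_cons, if_neg hc, List.filter_cons_of_pos (by simpa using hc), ih (acc ++ [c])]
      simp

-- B's comprehension computes pvCutsFrom
theorem pv_cuts_bridge (s : List Char) (i : Nat) :
    ((s.zip (s.drop 1)).zipIdx (i+1)).filterMap
      (fun pi => if PySem.Chars.isdigit pi.1.1 && !PySem.Chars.isdigit pi.1.2 then some pi.2 else none)
    = pvCutsFrom i s := by
  induction s generalizing i with
  | nil => rfl
  | cons p t ih =>
    cases t with
    | nil => rfl
    | cons c r =>
      simp only [List.drop_one, List.tail_cons, List.zip_cons_cons, List.zipIdx_cons,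
        List.filterMap_cons, pvCutsFrom]
      by_cases h : PySem.Chars.isdigit p && !PySem.Chars.isdigit c
      · simp only [h, if_pos]
        rw [← ih (i+1)]
        simp
      · simp only [h]
        rw [← ih (i+1)]
        simp

theorem pv_cuts_shift (s : List Char) (i j : Nat) :
    pvCutsFrom (i + j) s = (pvCutsFrom j s).map (· + i) := by
  induction s generalizing j with
  | nil => rfl
  | cons p t ih =>
    cases t with
    | nil => rfl
    | cons c r =>
      simp only [pvCutsFrom]
      by_cases h : PySem.Chars.isdigit p && !PySem.Chars.isdigit c
      · rw [if_pos h, if_pos h, List.map_cons, ← ih (j+1)]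
        have : i + (j + 1) = i + j + 1 := by omega
        rw [this]
        congr 1
        omega
      · rw [if_neg h, if_neg h, ← ih (j+1)]
        congr 1

theorem pv_cuts_nob (s : List Char) (h : pvNoB s) (i : Nat) : pvCutsFrom i s = [] := by
  induction s generalizing i with
  | nil => rfl
  | cons p t ih =>
    cases t with
    | nil => rfl
    | cons c r =>
      have h1 := List.IsChain.rel_head h
      have hb : (PySem.Chars.isdigit p && !PySem.Chars.isdigit c) = false := by
        cases hp : PySem.Chars.isdigit p <;> cases hc : PySem.Chars.isdigit c <;> simp_all
      simp only [pvCutsFrom, hb]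
      exact ih h.tail (i+1)

theorem pv_cuts_append (t : List Char) (c : Char) (l : List Char)
    (hnb : pvNoB t) (hne : t ≠ []) (hlast : PySem.Chars.isdigit (t.getLast hne) = true)
    (hc : PySem.Chars.isdigit c = false) (i : Nat) :
    pvCutsFrom i (t ++ c :: l) = (i + t.length) :: pvCutsFrom (i + t.length) (c :: l) := by
  induction t generalizing i with
  | nil => exact absurd rfl hne
  | cons p u ih =>
    cases u with
    | nil =>
      simp only [List.getLast] at hlast
      simp [pvCutsFrom, hlast, hc]
    | cons b v =>
      have h1 := List.IsChain.rel_head hnb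
      have hb : (PySem.Chars.isdigit p && !PySem.Chars.isdigit b) = false := by
        cases hp : PySem.Chars.isdigit p <;> cases hb' : PySem.Chars.isdigit b <;> simp_all
      have hl2 : PySem.Chars.isdigit ((b :: v).getLast (by simp)) = true := by
        rw [← hlast]; congr 1
      have hrec := ih hnb.tail (by simp) hl2 (i+1)
      simp only [List.cons_append] at hrec
      simp only [List.cons_append, pvCutsFrom, hb, Bool.false_eq_true, if_false, hrec]
      have he : i + 1 + (b :: v).length = i + (p :: b :: v).length := by simp; omega
      rw [he]

theorem pv_tokens_nob (s : List Char) (h : pvNoB s) : pvTokensOf s = [s] := by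
  simp [pvTokensOf, pv_cuts_nob s h 0]

theorem pv_tokens_split (t : List Char) (c : Char) (l : List Char)
    (hnb : pvNoB t) (hne : t ≠ []) (hlast : PySem.Chars.isdigit (t.getLast hne) = true)
    (hc : PySem.Chars.isdigit c = false) :
    pvTokensOf (t ++ c :: l) = t :: pvTokensOf (c :: l) := by
  have hcuts : pvCutsFrom 0 (t ++ c :: l)
      = t.length :: (pvCutsFrom 0 (c :: l)).map (· + t.length) := by
    rw [pv_cuts_append t c l hnb hne hlast hc 0]
    have := pv_cuts_shift (c :: l) t.length 0
    simp only [Nat.add_zero] at this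
    simp [this]
  unfold pvTokensOf
  rw [hcuts, List.cons_append, List.zip_cons_cons, List.map_cons]
  congr 1
  · simp
  · have h1 : (t.length :: (pvCutsFrom 0 (c :: l)).map (· + t.length))
        = (0 :: pvCutsFrom 0 (c :: l)).map (· + t.length) := by simp
    have h2 : ((pvCutsFrom 0 (c :: l)).map (· + t.length) ++ [(t ++ c :: l).length])
        = (pvCutsFrom 0 (c :: l) ++ [(c :: l).length]).map (· + t.length) := by
      simp; omega
    rw [h1, h2, List.zip_map, List.map_map]
    refine List.map_congr_left ?_
    intro ab _
    simp only [Function.comp, Prod.map]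
    have hd : ab.1 + t.length = t.length + ab.1 := by omega
    rw [Nat.add_sub_add_right, hd, List.drop_length_add_append]

def pvInv (dig : List Char) (prev : String) : Prop :=
  pvNoB dig ∧ ((dig = [] ∧ prev = "") ∨ ∃ t c0, dig = t ++ [c0] ∧ prev = String.ofList [c0])

theorem pv_nob_snoc (dig : List Char) (c : Char) (hnb : pvNoB dig)
    (h : ∀ (hne : dig ≠ []), ¬(PySem.Chars.isdigit (dig.getLast hne) = true ∧ PySem.Chars.isdigit c = false)) :
    pvNoB (dig ++ [c]) := by
  cases dig with
  | nil => exact List.isChain_singleton _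
  | cons a u =>
    refine List.IsChain.append hnb (List.isChain_singleton _) ?_
    intro x hx y hy
    simp at hy
    subst hy
    rw [Eq.symm (List.getLast_of_mem_getLast? hx)]
    exact h (by simp)

-- main invariant: A's tokenizer produces exactly the slices between cuts
theorem pv_main (l : List Char) (final : List String) (dig : List Char) (prev : String)
    (h : pvInv dig prev) :
    (fun r : List String × List Char × String => r.1 ++ [String.ofList r.2.1])
      (l.foldl (fun (st : List String × List Char × String) lett =>
        if PySem.Chars.isdigit lett then
          (st.1, st.2.1 ++ [lett], String.ofList [lett])
        else if PySem.Str.strIsdigit st.2.2 then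
          (st.1 ++ [String.ofList st.2.1], [lett], String.ofList [lett])
        else (st.1, st.2.1 ++ [lett], String.ofList [lett])) (final, dig, prev))
    = final ++ (pvTokensOf (dig ++ l)).map String.ofList := by
  induction l generalizing final dig prev with
  | nil =>
    simp only [List.foldl_nil, List.append_nil]
    rw [pv_tokens_nob dig h.1]
    simp
  | cons c l ih =>
    rw [List.foldl_cons]
    by_cases hd : PySem.Chars.isdigit c = true
    · rw [if_pos hd]
      have hinv : pvInv (dig ++ [c]) (String.ofList [c]) :=
        ⟨pv_nob_snoc dig c h.1 (fun _ hx => by simp [hd] at hx),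
         Or.inr ⟨dig, c, rfl, rfl⟩⟩
      have hih := ih final (dig ++ [c]) (String.ofList [c]) hinv
      dsimp only at hih ⊢
      rw [hih]
      simp [List.append_assoc]
    · rw [if_neg hd]
      rcases h.2 with ⟨hdig, hprev⟩ | ⟨t, c0, hdig, hprev⟩
      · subst hdig; subst hprev
        rw [if_neg (by simp [PySem.Str.strIsdigit, PySem.Chars.strIsdigit])]
        have hinv : pvInv [c] (String.ofList [c]) :=
          ⟨List.isChain_singleton _, Or.inr ⟨[], c, rfl, rfl⟩⟩
        have hih := ih final [c] (String.ofList [c]) hinv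
        dsimp only at hih ⊢
        simp only [List.nil_append] at hih ⊢
        rw [hih]
        rfl
      · subst hdig; subst hprev
        have hstr : PySem.Str.strIsdigit (String.ofList [c0]) = PySem.Chars.isdigit c0 := by
          simp [PySem.Str.strIsdigit, PySem.Chars.strIsdigit]
        by_cases h0 : PySem.Chars.isdigit c0 = true
        · rw [if_pos (by rw [hstr]; exact h0)]
          have hinv : pvInv [c] (String.ofList [c]) :=
            ⟨List.isChain_singleton _, Or.inr ⟨[], c, rfl, rfl⟩⟩
          have hih := ih (final ++ [String.ofList (t ++ [c0])]) [c] (String.ofList [c]) hinv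
          dsimp only at hih ⊢
          rw [hih]
          have hlast : PySem.Chars.isdigit ((t ++ [c0]).getLast (by simp)) = true := by
            simpa using h0
          rw [List.append_assoc, List.singleton_append,
            pv_tokens_split (t ++ [c0]) c l h.1 (by simp) hlast (by simpa using hd)]
          simp
        · rw [if_neg (by rw [hstr]; exact h0)]
          have hinv : pvInv ((t ++ [c0]) ++ [c]) (String.ofList [c]) :=
            ⟨pv_nob_snoc (t ++ [c0]) c h.1 (fun hne hx => by
                have : PySem.Chars.isdigit c0 = true := by simpa using hx.1
                exact h0 this),
             Or.inr ⟨t ++ [c0], c, rfl, rfl⟩⟩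
          have hih := ih final ((t ++ [c0]) ++ [c]) (String.ofList [c]) hinv
          dsimp only at hih ⊢
          rw [hih]
          simp [List.append_assoc]

-- A's third loop, joined, is the join of pvMarkup over the tokens
theorem pv_third (fs m : List String) :
    PySem.Str.join "" (fs.foldl (fun math d =>
      if PySem.Str.strIsdigit d then math ++ ["<mn>" ++ d ++ "</mn>"]
      else if d = "." ∨ d = "," then math ++ ["<mi>" ++ d ++ "</mi>"]
      else if d = "*" then math ++ ["<mo>" ++ "&#215;" ++ "</mo>"]
      else if d = "/" then math ++ ["<mo>" ++ "&#247;" ++ "</mo>"]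
      else if d = ">" then math ++ ["<mo>" ++ "&#62;" ++ "</mo>"]
      else if d = "<" then math ++ ["<mo>" ++ "&#60;" ++ "</mo>"]
      else math ++ ["<mo>&#160;</mo>", "<mi>" ++ d ++ "</mi>", "<mo>&#160;</mo>"]) m)
    = PySem.Str.join "" m ++ PySem.Str.join "" (fs.map pvMarkup) := by
  induction fs generalizing m with
  | nil => simp [pv_join_nil]
  | cons d fs ih =>
    rw [List.foldl_cons, List.map_cons, ih, pv_join_cons, ← String.append_assoc]
    congr 1
    unfold pvMarkup
    split_ifs <;> simp [pv_join_append, pv_join_cons, pv_join_nil, String.append_assoc]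
    rw [← String.append_assoc]
    simp

-- ===== VERDICT (by name: the statement is the Claim_ definition above) =====
theorem mathunit_spec : Claim_equal_mathunit := by
  intro k _
  show mathunit k = mathunit_alt k
  simp only [mathunit, mathunit_alt, matt]
  rw [pv_filter_loop, pv_third, pv_join_nil, pv_cuts_bridge]
  have hm := pv_main (k.toList.filter (fun c => !(c = '[' ∨ c = ']' : Bool))) [] [] ""
    ⟨List.IsChain.nil, Or.inl ⟨rfl, rfl⟩⟩
  simp only [List.nil_append] at hm ⊢
  rw [hm]
  simp [pvTokensOf, List.map_map, Function.comp_def]
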